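-- pv_equiv track=rewrite | github.com/Max-Prilutsky/Sylver_Coinage | SylverBuilderExe.py | positionAfterPlayingMove
-- ===== SOURCE A (Python) =====
-- def positionAfterPlayingMove(gaps, move):
--     part_of_semigroup = [element for element in range(max(gaps)) if element not in gaps]
--     eliminated_gaps = []
--     for gap in gaps:
--         for element in part_of_semigroup:
--             if(gap - element < 0):
--                 break
--             else:
--                 if((gap-element)%move == 0):
--                     eliminated_gaps.append(gap)
--                     break
--     return [gap for gap in gaps if(gap not in eliminated_gaps)]
-- ===== SOURCE B (Python) =====
-- def positionAfterPlayingMove(gaps, move):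
--     gapset = set(gaps)
--     top = max(gaps)
--     m = abs(move)
--     first_free = {}   # residue mod m -> least value of that residue class outside gapset
--     kept = set()
--     for gap in gapset:
--         r = gap % m
--         f = first_free.get(r)
--         if f is None:
--             f = r
--             while f in gapset:
--                 f += m
--             first_free[r] = f
--         if f > gap or f >= top:
--             kept.add(gap)
--     return [gap for gap in gaps if gap in kept]
-- ===== Notes on version B (the rewrite author's own statement) =====
-- stated objective: faster
-- what changed: Instead of building the list of sub-maximum non-gap semigroup elements and scanning it per gap, B puts the gaps in a set, computes per distinct gap (memoised per residue mod |move|) the first value of the residue chain gap % |move|, +|move|, ... outside the gap set, which witnesses elimination iff it is <= gap and < max(gaps).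
-- outside the precondition, e.g. on positionAfterPlayingMove([0], 0): A returns [0], B raises ZeroDivisionError
import Mathlib
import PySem

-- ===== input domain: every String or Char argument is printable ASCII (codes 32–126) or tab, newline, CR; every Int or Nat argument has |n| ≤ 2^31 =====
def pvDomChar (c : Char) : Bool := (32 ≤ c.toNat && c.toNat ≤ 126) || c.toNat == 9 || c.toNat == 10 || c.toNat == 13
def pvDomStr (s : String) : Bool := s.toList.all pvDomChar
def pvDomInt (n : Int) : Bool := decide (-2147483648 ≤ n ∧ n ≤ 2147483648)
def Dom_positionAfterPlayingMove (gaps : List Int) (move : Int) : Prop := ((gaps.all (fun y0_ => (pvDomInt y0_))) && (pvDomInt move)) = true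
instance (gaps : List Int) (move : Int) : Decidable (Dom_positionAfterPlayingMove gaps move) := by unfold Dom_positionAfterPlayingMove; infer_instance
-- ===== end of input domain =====

-- B replaces A's scan of the whole sub-maximum semigroup per gap by one residue-chain walk
-- from gap % |move| through the gap set (objective: faster).

-- ===== PORT A =====
-- inner 'for element in part_of_semigroup: … break' loop of A
def pvElimScan (move gap : Int) : List Int → Bool
  | [] => false
  | e :: rest =>
    if gap - e < 0 then false
    else if PySem.Int.mod (gap - e) move = 0 then true
    else pvElimScan move gap rest

def positionAfterPlayingMove (gaps : List Int) (move : Int) : List Int :=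
  match PySem.List.max? gaps (fun x => x) with
  | none => []   -- max([]) raises ValueError in Python; excluded by Pre_
  | some mx =>
    let part := (PySem.List.pyRange 0 mx 1).filter (fun e => decide (e ∉ gaps))
    let elim := gaps.foldl (fun acc gap => if pvElimScan move gap part then acc ++ [gap] else acc) ([] : List Int)
    gaps.filter (fun gap => decide (gap ∉ elim))

-- ===== PORT B =====
-- Source B's 'while f in gapset: f += m' loop; the fuel (|gaps|+1 at the call site) is only a
-- totality guard: for m > 0 the loop exits after at most |set(gaps)| iterations (proved below)
def pvFreeScan (gapset : List Int) (m : Int) : Nat → Int → Int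
  | 0, e => e
  | fuel+1, e => if e ∈ gapset then pvFreeScan gapset m fuel (e + m) else e

-- body of Source B's 'for gap in gapset' loop, threading (first_free, kept)
def pvKeptStep (gapset : PySem.Set Int) (m top : Int) (fuel : Nat)
    (st : PySem.Dict Int Int × PySem.Set Int) (gap : Int) : PySem.Dict Int Int × PySem.Set Int :=
  let r := PySem.Int.mod gap m
  let (fs, f) :=
    match PySem.Dict.get? st.1 r with
    | some f => (st.1, f)
    | none =>
      let f := pvFreeScan gapset m fuel r
      (PySem.Dict.insert st.1 r f, f)
  (fs, if f > gap ∨ f ≥ top then PySem.Set.add st.2 gap else st.2)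

-- Python iterates 'for gap in gapset' in hash order; the loop only builds the SET kept
-- (and the final line only tests membership in it), so the result is order-independent
-- and iterating the Set in its list order is exact.
def positionAfterPlayingMove_alt (gaps : List Int) (move : Int) : List Int :=
  match PySem.List.max? gaps (fun x => x) with
  | none => []   -- max([]) raises ValueError in Python; excluded by Pre_
  | some top =>
    let gapset : PySem.Set Int := PySem.Set.ofList gaps
    let m := |move|
    let kept := (gapset.foldl (pvKeptStep gapset m top (gaps.length + 1)) (PySem.Dict.empty, PySem.Set.empty)).2
    gaps.filter (fun gap => decide (gap ∈ kept))

-- ===== PRECONDITION & SPEC =====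
-- Pre_ excludes the empty gap list (max([]) raises ValueError) and move = 0 (A's '% move'
-- raises ZeroDivisionError whenever it is reached, and B's 'gap % m' raises there too).
def Pre_positionAfterPlayingMove (gaps : List Int) (move : Int) : Prop := gaps ≠ [] ∧ move ≠ 0
instance (gaps : List Int) (move : Int) : Decidable (Pre_positionAfterPlayingMove gaps move) := by unfold Pre_positionAfterPlayingMove; infer_instance

def pvWitness_positionAfterPlayingMove : List Int × Int := ([2, 3], 2)

def Spec_positionAfterPlayingMove (gaps : List Int) (move : Int) (out : List Int) : Prop := out = positionAfterPlayingMove_alt gaps move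
instance (gaps : List Int) (move : Int) (out : List Int) : Decidable (Spec_positionAfterPlayingMove gaps move out) := by unfold Spec_positionAfterPlayingMove; infer_instance

-- ===== CLAIM (what is proved, stated in full; the proofs are below) =====
def Claim_equal_positionAfterPlayingMove : Prop := ∀ (gaps : List Int) (move : Int), Dom_positionAfterPlayingMove gaps move → Pre_positionAfterPlayingMove gaps move → Spec_positionAfterPlayingMove gaps move (positionAfterPlayingMove gaps move)

-- ===== LEMMAS AND PROOFS =====

-- A's inner loop over an ascending list finds an element iff a qualifying element exists
theorem pvElimScan_iff (move gap : Int) (l : List Int) (hs : l.Pairwise (· ≤ ·)) :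
    pvElimScan move gap l = true ↔ ∃ x ∈ l, x ≤ gap ∧ PySem.Int.mod (gap - x) move = 0 := by
  induction l with
  | nil => simp [pvElimScan]
  | cons e rest ih =>
    rcases List.pairwise_cons.mp hs with ⟨hhead, htail⟩
    by_cases hlt : gap - e < 0
    · simp only [pvElimScan, if_pos hlt]
      constructor
      · intro h; exact absurd h (by simp)
      · rintro ⟨x, hx, hxg, -⟩
        rcases List.mem_cons.mp hx with rfl | hx
        · omega
        · have := hhead x hx; omega
    · by_cases hmod : PySem.Int.mod (gap - e) move = 0
      · simp only [pvElimScan, if_neg hlt, if_pos hmod]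
        constructor
        · intro _; exact ⟨e, by simp, by omega, hmod⟩
        · intro _; trivial
      · simp only [pvElimScan, if_neg hlt, if_neg hmod]
        rw [ih htail]
        constructor
        · rintro ⟨x, hx, h1, h2⟩; exact ⟨x, by simp [hx], h1, h2⟩
        · rintro ⟨x, hx, h1, h2⟩
          rcases List.mem_cons.mp hx with rfl | hx
          · exact absurd h2 hmod
          · exact ⟨x, hx, h1, h2⟩

-- B's residue-chain walk: with enough fuel it returns the least element of
-- e₀ + m·ℕ that is not in s
theorem pvFreeScan_spec (s : List Int) (m : Int) (hm : 0 < m) :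
    ∀ (fuel : Nat) (e : Int), (s.toFinset.filter (fun x => e ≤ x)).card < fuel →
      pvFreeScan s m fuel e ∉ s ∧ e ≤ pvFreeScan s m fuel e ∧
      m ∣ (pvFreeScan s m fuel e - e) ∧
      ∀ x, e ≤ x → x < pvFreeScan s m fuel e → m ∣ (x - e) → x ∈ s := by
  intro fuel
  induction fuel with
  | zero => intro e h; omega
  | succ n ih =>
    intro e hcard
    by_cases he : e ∈ s
    · have hss : (s.toFinset.filter (fun x => e + m ≤ x)) ⊂ (s.toFinset.filter (fun x => e ≤ x)) := by
        constructor
        · intro x hx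
          simp only [Finset.mem_filter] at hx ⊢
          exact ⟨hx.1, by omega⟩
        · intro hsub
          have : e ∈ (s.toFinset.filter (fun x => e + m ≤ x)) :=
            hsub (by simp [Finset.mem_filter, he])
          simp only [Finset.mem_filter] at this
          omega
      have hcard' : (s.toFinset.filter (fun x => e + m ≤ x)).card < n := by
        have := Finset.card_lt_card hss
        omega
      obtain ⟨h1, h2, h3, h4⟩ := ih (e + m) hcard'
      have hstep : pvFreeScan s m (n+1) e = pvFreeScan s m n (e + m) := by
        simp [pvFreeScan, he]
      rw [hstep]
      refine ⟨h1, by omega, ?_, ?_⟩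
      · obtain ⟨k, hk⟩ := h3
        refine ⟨k + 1, ?_⟩
        have h2 : m * (k + 1) = m * k + m := by ring
        omega
      · intro x hx1 hx2 hx3
        by_cases hxe : x < e + m
        · obtain ⟨k, hk⟩ := hx3
          have hk0 : k = 0 := by
            by_contra hkne
            rcases lt_or_gt_of_ne hkne with hneg | hpos
            · have : m * k ≤ m * (-1) := mul_le_mul_of_nonneg_left (by omega) (le_of_lt hm)
              omega
            · have : m * 1 ≤ m * k := mul_le_mul_of_nonneg_left (by omega) (le_of_lt hm)
              omega
          have hxeq : x = e := by rw [hk0, mul_zero] at hk; omega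
          rwa [hxeq]
        · refine h4 x (by omega) hx2 ?_
          obtain ⟨k, hk⟩ := hx3
          refine ⟨k - 1, ?_⟩
          have h2 : m * (k - 1) = m * k - m := by ring
          omega
    · have hstop : pvFreeScan s m (n+1) e = e := by simp [pvFreeScan, he]
      rw [hstop]
      exact ⟨he, le_refl e, ⟨0, by ring⟩, fun x h1 h2 _ => by omega⟩

-- Python mod by a positive modulus: nonneg, below m, congruent
theorem pvMod_props (g m : Int) (hm : 0 < m) :
    0 ≤ PySem.Int.mod g m ∧ PySem.Int.mod g m < m ∧ m ∣ (g - PySem.Int.mod g m) := by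
  rw [PySem.Int.mod_eq_emod_of_pos hm]
  refine ⟨Int.emod_nonneg g (by omega), Int.emod_lt_of_pos g hm, ⟨g / m, ?_⟩⟩
  have := Int.mul_ediv_add_emod g m
  linarith

-- the fold over the gap set puts exactly the gaps passing the test into kept,
-- and caches only correct first-free values
theorem pvKept_mem (gapset : PySem.Set Int) (m top : Int) (fuel : Nat) (l : List Int)
    (st : PySem.Dict Int Int × PySem.Set Int)
    (hinv : ∀ r v, PySem.Dict.get? st.1 r = some v → v = pvFreeScan gapset m fuel r) (y : Int) :
    (y ∈ (l.foldl (pvKeptStep gapset m top fuel) st).2 ↔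
      y ∈ st.2 ∨ (y ∈ l ∧
        (pvFreeScan gapset m fuel (PySem.Int.mod y m) > y ∨
         pvFreeScan gapset m fuel (PySem.Int.mod y m) ≥ top))) := by
  induction l generalizing st with
  | nil => simp
  | cons gap rest ih =>
    -- one step: the f looked up or computed for gap is the first-free value of its residue
    have hsnd : (pvKeptStep gapset m top fuel st gap).2 =
        if pvFreeScan gapset m fuel (PySem.Int.mod gap m) > gap ∨
           pvFreeScan gapset m fuel (PySem.Int.mod gap m) ≥ top
        then PySem.Set.add st.2 gap else st.2 := by
      unfold pvKeptStep
      rcases hget : PySem.Dict.get? st.1 (PySem.Int.mod gap m) with _ | f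
      · simp only [hget]
      · simp only [hget, hinv _ _ hget]
    have hfst : ∀ r v, PySem.Dict.get? (pvKeptStep gapset m top fuel st gap).1 r = some v →
        v = pvFreeScan gapset m fuel r := by
      intro r v hv
      unfold pvKeptStep at hv
      rcases hget : PySem.Dict.get? st.1 (PySem.Int.mod gap m) with _ | f
      · simp only [hget] at hv
        by_cases hr : r = PySem.Int.mod gap m
        · subst hr
          rw [PySem.Dict.get?_insert_self] at hv
          exact (Option.some_inj.mp hv).symm
        · rw [PySem.Dict.get?_insert_of_ne _ _ hr] at hv
          exact hinv r v hv
      · simp only [hget] at hv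
        exact hinv r v hv
    rw [List.foldl_cons, ih _ hfst, hsnd]
    simp only [List.mem_cons]
    by_cases hcond : pvFreeScan gapset m fuel (PySem.Int.mod gap m) > gap ∨
        pvFreeScan gapset m fuel (PySem.Int.mod gap m) ≥ top
    · rw [if_pos hcond, PySem.Set.mem_add]
      constructor
      · rintro ((h | rfl) | h)
        · exact Or.inl h
        · exact Or.inr ⟨Or.inl rfl, hcond⟩
        · exact Or.inr ⟨Or.inr h.1, h.2⟩
      · rintro (h | ⟨(rfl | hy), hc⟩)
        · exact Or.inl (Or.inl h)
        · exact Or.inl (Or.inr rfl)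
        · exact Or.inr ⟨hy, hc⟩
    · rw [if_neg hcond]
      constructor
      · rintro (h | h)
        · exact Or.inl h
        · exact Or.inr ⟨Or.inr h.1, h.2⟩
      · rintro (h | ⟨(rfl | hy), hc⟩)
        · exact Or.inl h
        · exact absurd hc hcond
        · exact Or.inr ⟨hy, hc⟩

-- A's per-gap test agrees with B's per-gap test
theorem pv_per_gap (gaps : List Int) (move mx gap : Int) (hmv : move ≠ 0) :
    pvElimScan move gap ((PySem.List.pyRange 0 mx 1).filter (fun e => decide (e ∉ gaps))) = true
    ↔ (pvFreeScan (PySem.Set.ofList gaps) |move| (gaps.length + 1) (PySem.Int.mod gap |move|) ≤ gap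
       ∧ pvFreeScan (PySem.Set.ofList gaps) |move| (gaps.length + 1) (PySem.Int.mod gap |move|) < mx) := by
  have hm : (0:Int) < |move| := by positivity
  set m : Int := |move| with hmdef
  set e0 : Int := PySem.Int.mod gap m with he0
  obtain ⟨he0n, he0m, he0d⟩ := pvMod_props gap m hm
  have hcard : ((PySem.Set.ofList gaps : List Int).toFinset.filter (fun x => e0 ≤ x)).card < gaps.length + 1 := by
    have h2 : (PySem.Set.ofList gaps : List Int).toFinset = gaps.toFinset := by
      ext x; simp [List.mem_toFinset, PySem.Set.mem_ofList]
    rw [h2]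
    have h1 : (gaps.toFinset.filter (fun x => e0 ≤ x)).card ≤ gaps.toFinset.card :=
      Finset.card_filter_le _ _
    have h3 : gaps.toFinset.card ≤ gaps.length := gaps.toFinset_card_le
    omega
  obtain ⟨hf1, hf2, hf3, hf4⟩ := pvFreeScan_spec (PySem.Set.ofList gaps) m hm (gaps.length + 1) e0 hcard
  set f : Int := pvFreeScan (PySem.Set.ofList gaps) m (gaps.length + 1) e0 with hfdef
  have hsorted : ((PySem.List.pyRange 0 mx 1).filter (fun e => decide (e ∉ gaps))).Pairwise (· ≤ ·) := by
    refine List.Pairwise.filter _ ?_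
    exact (PySem.List.pairwise_lt_pyRange_one 0 mx).imp (fun h => le_of_lt h)
  rw [pvElimScan_iff move gap _ hsorted]
  have hdvd_iff : ∀ y : Int, PySem.Int.mod y move = 0 ↔ m ∣ y := by
    intro y; rw [PySem.Int.mod_eq_zero_iff_dvd, hmdef, abs_dvd]
  constructor
  · rintro ⟨x, hx, hxg, hxmod⟩
    rw [List.mem_filter] at hx
    obtain ⟨hxr, hxng⟩ := hx
    rw [PySem.List.mem_pyRange_one] at hxr
    have hxng' : x ∉ gaps := by simpa using hxng
    have hdx : m ∣ (gap - x) := (hdvd_iff _).mp hxmod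
    -- x ≡ e0 (mod m) and x ≥ 0, e0 < m imply e0 ≤ x
    have hxe : m ∣ (x - e0) := by
      have : x - e0 = (gap - e0) - (gap - x) := by ring
      rw [this]; exact dvd_sub he0d hdx
    have he0x : e0 ≤ x := by
      by_contra hlt
      rw [not_le] at hlt
      have hpos : 0 < e0 - x := by omega
      have hd : m ∣ (e0 - x) := by
        have : e0 - x = -(x - e0) := by ring
        rw [this]; exact (dvd_neg).mpr hxe
      have := Int.le_of_dvd hpos hd
      omega
    -- minimality: f ≤ x
    have hfx : f ≤ x := by
      by_contra hlt
      rw [not_le] at hlt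
      have := hf4 x he0x hlt hxe
      rw [PySem.Set.mem_ofList] at this
      exact hxng' this
    exact ⟨by omega, by omega⟩
  · rintro ⟨hfg, hfmx⟩
    refine ⟨f, ?_, hfg, ?_⟩
    · rw [List.mem_filter, PySem.List.mem_pyRange_one]
      have : f ∉ gaps := by
        intro h; exact hf1 ((PySem.Set.mem_ofList gaps f).mpr h)
      exact ⟨⟨by omega, hfmx⟩, by simpa using this⟩
    · rw [hdvd_iff]
      have : gap - f = (gap - e0) - (f - e0) := by ring
      rw [this]; exact dvd_sub he0d hf3

-- ===== VERDICT (by name: the statement is the Claim_ definition above) =====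
theorem positionAfterPlayingMove_spec : Claim_equal_positionAfterPlayingMove := by
  intro gaps move _ hpre
  obtain ⟨hne, hmv⟩ := hpre
  unfold Spec_positionAfterPlayingMove positionAfterPlayingMove positionAfterPlayingMove_alt
  rcases hmx : PySem.List.max? gaps (fun x => x) with _ | mx
  · exact absurd ((PySem.List.max?_eq_none_iff gaps _).mp hmx) hne
  · simp only []
    have hfold : gaps.foldl (fun acc gap => if pvElimScan move gap (List.filter (fun e => decide (e ∉ gaps)) (PySem.List.pyRange 0 mx 1)) = true then acc ++ [gap] else acc) []
        = gaps.filter (fun gap => pvElimScan move gap (List.filter (fun e => decide (e ∉ gaps)) (PySem.List.pyRange 0 mx 1))) := by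
      simpa using PySem.List.foldl_append_if
        (fun gap => pvElimScan move gap (List.filter (fun e => decide (e ∉ gaps)) (PySem.List.pyRange 0 mx 1))) id gaps []
    rw [hfold]
    refine List.filter_congr ?_
    intro g hg
    have hmem : g ∈ gaps.filter (fun gap => pvElimScan move gap ((PySem.List.pyRange 0 mx 1).filter (fun e => decide (e ∉ gaps))))
        ↔ pvElimScan move g ((PySem.List.pyRange 0 mx 1).filter (fun e => decide (e ∉ gaps))) = true := by
      rw [List.mem_filter]
      exact ⟨fun h => h.2, fun h => ⟨hg, h⟩⟩
    have hkept : g ∈ (List.foldl (pvKeptStep (PySem.Set.ofList gaps) |move| mx (gaps.length + 1))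
          (PySem.Dict.empty, PySem.Set.empty) (PySem.Set.ofList gaps)).2
        ↔ (pvFreeScan (PySem.Set.ofList gaps) |move| (gaps.length + 1) (PySem.Int.mod g |move|) > g ∨
           pvFreeScan (PySem.Set.ofList gaps) |move| (gaps.length + 1) (PySem.Int.mod g |move|) ≥ mx) := by
      rw [pvKept_mem (PySem.Set.ofList gaps) |move| mx (gaps.length + 1) (PySem.Set.ofList gaps)
        (PySem.Dict.empty, PySem.Set.empty) (by intro r v hv; simp [PySem.Dict.get?, PySem.Dict.empty] at hv) g]
      have hgset : g ∈ PySem.Set.ofList gaps := (PySem.Set.mem_ofList gaps g).mpr hg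
      simp [PySem.Set.empty, hgset]
    rw [decide_eq_decide]
    rw [hmem]
    rw [pv_per_gap gaps move mx g hmv, hkept]
    omega
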